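-- pv_equiv track=rewrite | github.com/hrolfurgylfa/Heroku | app.py | saekjaAlltIKorfu
-- ===== SOURCE A (Python) =====
-- def saekjaAlltIKorfu(breyta):
--     allt_i_korfu = []
--     tala_komin = False
--     for tala in breyta["fot"]:
--         if tala_komin is False:
--             tala_komin = True
--             tala1 = tala
--         else:
--             tala_komin = False
--             allt_i_korfu.append(str(tala1)+str(tala))
--
--     return allt_i_korfu
-- ===== SOURCE B (Python) =====
-- def saekjaAlltIKorfu(breyta):
--     def pairs(lst):
--         if len(lst) < 2:
--             return []
--         return [str(lst[0]) + str(lst[1])] + pairs(lst[2:])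
--     return pairs(breyta["fot"])
-- ===== Notes on version B (the rewrite author's own statement) =====
-- stated objective: simpler
-- what changed: Replaces the toggle-flag loop carrying tala_komin/tala1 state with a direct structural recursion that consumes the list two elements at a time.
import Mathlib
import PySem

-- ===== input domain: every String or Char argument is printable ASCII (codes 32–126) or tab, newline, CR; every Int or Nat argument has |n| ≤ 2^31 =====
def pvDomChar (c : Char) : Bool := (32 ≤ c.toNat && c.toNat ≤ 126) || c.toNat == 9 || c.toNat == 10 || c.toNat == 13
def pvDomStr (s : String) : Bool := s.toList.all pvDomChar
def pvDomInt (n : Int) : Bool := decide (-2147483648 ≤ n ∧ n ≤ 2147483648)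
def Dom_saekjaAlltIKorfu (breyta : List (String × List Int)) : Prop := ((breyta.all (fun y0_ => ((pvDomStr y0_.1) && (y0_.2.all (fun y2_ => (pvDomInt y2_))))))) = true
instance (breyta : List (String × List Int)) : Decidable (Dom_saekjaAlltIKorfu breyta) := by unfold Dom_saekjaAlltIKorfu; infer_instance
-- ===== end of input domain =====

-- B replaces A's toggle-flag loop (tala_komin/tala1 state) with a direct pairwise structural recursion; same O(n) cost, simpler decomposition.


-- ===== PORT A =====
-- loop body: state = (allt_i_korfu, tala_komin, tala1); tala1 starts at 0 (never read before first assignment, since tala_komin starts false)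
def saekjaAlltIKorfuStep (st : List String × Bool × Int) (tala : Int) : List String × Bool × Int :=
  if st.2.1 = false then (st.1, true, tala)
  else (st.1 ++ [PySem.Int.toStr st.2.2 ++ PySem.Int.toStr tala], false, st.2.2)

def saekjaAlltIKorfu (breyta : List (String × List Int)) : List String :=
  match List.lookup "fot" breyta with
  | none => []   -- KeyError in Python; excluded by Pre_
  | some lst => (lst.foldl saekjaAlltIKorfuStep ([], false, 0)).1

-- ===== PORT B =====
def saekjaAlltIKorfuPairs : List Int → List String
  | a :: b :: rest => (PySem.Int.toStr a ++ PySem.Int.toStr b) :: saekjaAlltIKorfuPairs rest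
  | _ => []

def saekjaAlltIKorfu_alt (breyta : List (String × List Int)) : List String :=
  match List.lookup "fot" breyta with
  | none => []   -- KeyError in Python; excluded by Pre_
  | some lst => saekjaAlltIKorfuPairs lst

-- ===== PRECONDITION & SPEC =====
-- Pre_: Python raises KeyError when "fot" is not a key of breyta; that is the only exception.
def Pre_saekjaAlltIKorfu (breyta : List (String × List Int)) : Prop :=
  (List.lookup "fot" breyta).isSome = true
instance (breyta : List (String × List Int)) : Decidable (Pre_saekjaAlltIKorfu breyta) := by unfold Pre_saekjaAlltIKorfu; infer_instance

def pvWitness_saekjaAlltIKorfu : (List (String × List Int)) := [("fot", [1, 2, 3])]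

def Spec_saekjaAlltIKorfu (breyta : List (String × List Int)) (out : List String) : Prop := out = saekjaAlltIKorfu_alt breyta
instance (breyta : List (String × List Int)) (out : List String) : Decidable (Spec_saekjaAlltIKorfu breyta out) := by unfold Spec_saekjaAlltIKorfu; infer_instance

-- ===== CLAIM (what is proved, stated in full; the proofs are below) =====
def Claim_equal_saekjaAlltIKorfu : Prop := ∀ (breyta : List (String × List Int)), Dom_saekjaAlltIKorfu breyta → Pre_saekjaAlltIKorfu breyta → Spec_saekjaAlltIKorfu breyta (saekjaAlltIKorfu breyta)

-- ===== LEMMAS AND PROOFS =====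
-- the first element of a pair, once seen, prepends one concatenated pair to the rest
def saekjaAlltIKorfuHead (t1 : Int) : List Int → List String
  | b :: rest => (PySem.Int.toStr t1 ++ PySem.Int.toStr b) :: saekjaAlltIKorfuPairs rest
  | [] => []

theorem saekjaAlltIKorfu_fold (lst : List Int) : ∀ (acc : List String) (t : Int),
    ((lst.foldl saekjaAlltIKorfuStep (acc, false, t)).1 = acc ++ saekjaAlltIKorfuPairs lst) ∧
    ∀ t1 : Int, (lst.foldl saekjaAlltIKorfuStep (acc, true, t1)).1 = acc ++ saekjaAlltIKorfuHead t1 lst := by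
  induction lst with
  | nil => intro acc t; simp [saekjaAlltIKorfuPairs, saekjaAlltIKorfuHead]
  | cons a rest ih =>
    intro acc t
    constructor
    · have h := (ih acc t).2 a
      simp only [List.foldl_cons, saekjaAlltIKorfuStep, if_true] at *
      rw [h]
      cases rest <;> simp [saekjaAlltIKorfuPairs, saekjaAlltIKorfuHead]
    · intro t1
      have h := (ih (acc ++ [PySem.Int.toStr t1 ++ PySem.Int.toStr a]) t1).1
      simp only [List.foldl_cons, saekjaAlltIKorfuStep, Bool.true_eq_false, if_false] at *
      rw [h]
      simp [saekjaAlltIKorfuHead]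

-- ===== VERDICT (by name: the statement is the Claim_ definition above) =====
theorem saekjaAlltIKorfu_spec : Claim_equal_saekjaAlltIKorfu := by
  intro breyta _ _
  unfold Spec_saekjaAlltIKorfu saekjaAlltIKorfu saekjaAlltIKorfu_alt
  cases h : List.lookup "fot" breyta with
  | none => rfl
  | some lst => simpa using (saekjaAlltIKorfu_fold lst [] 0).1
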